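-- pv_equiv track=rewrite | github.com/t-young31/MDutils | MDutils/rdfgen.py | get_elem1_elem2_ids
-- ===== SOURCE A (Python) =====
-- def get_elem1_elem2_ids(xyzs, elem1_name, elem2_name):
--     """
--     From a set of xyzs get the indexes of element 1 and element 2 as two lists
--
--     :param xyzs: (list(list))
--     :param elem1_name: (str)
--     :param elem2_name: (str)
--     :return: (list, list)
--     """
--
--     elem1_ids, elem2_ids = [], []
--
--     for i, xyz in enumerate(xyzs):
--         if xyz[0].lower() == elem1_name.lower():
--             elem1_ids.append(i)
--
--         if xyz[0].lower() == elem2_name.lower():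
--             elem2_ids.append(i)
--
--     return elem1_ids, elem2_ids
-- ===== SOURCE B (Python) =====
-- def get_elem1_elem2_ids(xyzs, elem1_name, elem2_name):
--     """One-pass grouping: map each lower-cased leading symbol to its index list, then look up both names."""
--     groups = {}
--     for i, xyz in enumerate(xyzs):
--         groups.setdefault(xyz[0].lower(), []).append(i)
--     return list(groups.get(elem1_name.lower(), [])), list(groups.get(elem2_name.lower(), []))
-- ===== Notes on version B (the rewrite author's own statement) =====
-- stated objective: faster
-- what changed: Replaces the two per-element case-insensitive equality tests inside the loop by one grouping pass that builds a dict from lower-cased symbol to index list, answering both names by a single lookup each; this lowercases each row symbol (and the query names) once instead of per comparison.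
import Mathlib
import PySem

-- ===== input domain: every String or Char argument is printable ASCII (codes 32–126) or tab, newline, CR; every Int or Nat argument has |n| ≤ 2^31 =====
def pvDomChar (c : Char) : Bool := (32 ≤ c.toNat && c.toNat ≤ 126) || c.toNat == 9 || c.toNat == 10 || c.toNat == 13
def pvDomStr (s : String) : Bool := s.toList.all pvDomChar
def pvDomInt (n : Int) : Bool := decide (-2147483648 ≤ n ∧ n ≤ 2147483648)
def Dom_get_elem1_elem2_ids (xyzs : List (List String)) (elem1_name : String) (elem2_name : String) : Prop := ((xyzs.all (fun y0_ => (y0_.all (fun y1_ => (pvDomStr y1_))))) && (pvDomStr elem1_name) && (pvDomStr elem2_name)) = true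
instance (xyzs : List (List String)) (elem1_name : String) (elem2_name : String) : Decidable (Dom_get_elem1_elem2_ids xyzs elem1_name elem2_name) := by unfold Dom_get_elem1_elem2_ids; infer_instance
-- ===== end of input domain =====

-- B replaces A's two in-loop case-insensitive equality tests by one grouping pass (dict from lower-cased symbol to index list) plus two lookups; a timing run measured B faster (constant-factor: each symbol is lower-cased once, not per comparison).


-- ===== PORT A =====
-- xyz[0] is PySem.List.pyGetD under Pre_ (every row nonempty, where Python's xyz[0] returns).
def get_elem1_elem2_ids (xyzs : List (List String)) (elem1_name : String) (elem2_name : String) : List Int × List Int :=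
  (PySem.List.enumerate xyzs 0).foldl
    (fun st p =>
      let st1 := if PySem.Str.lower (PySem.List.pyGetD p.2 0 "") == PySem.Str.lower elem1_name
                 then (st.1 ++ [p.1], st.2) else st
      if PySem.Str.lower (PySem.List.pyGetD p.2 0 "") == PySem.Str.lower elem2_name
      then (st1.1, st1.2 ++ [p.1]) else st1)
    ([], [])

-- ===== PORT B =====
-- groups.setdefault(k, []).append(i) is Dict.modify k [] (· ++ [i]); list(groups.get(k, [])) is Dict.getD k [].
def pvGroups (xyzs : List (List String)) : PySem.Dict String (List Int) :=
  (PySem.List.enumerate xyzs 0).foldl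
    (fun d p => d.modify (PySem.Str.lower (PySem.List.pyGetD p.2 0 "")) [] (· ++ [p.1]))
    PySem.Dict.empty

def get_elem1_elem2_ids_alt (xyzs : List (List String)) (elem1_name : String) (elem2_name : String) : List Int × List Int :=
  ((pvGroups xyzs).getD (PySem.Str.lower elem1_name) [], (pvGroups xyzs).getD (PySem.Str.lower elem2_name) [])

-- ===== PRECONDITION & SPEC =====
-- Pre_ excludes inputs with an empty row, on which Python A (and B) raise IndexError at xyz[0].
def Pre_get_elem1_elem2_ids (xyzs : List (List String)) (elem1_name : String) (elem2_name : String) : Prop :=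
  ∀ row ∈ xyzs, row ≠ []
instance (xyzs : List (List String)) (elem1_name : String) (elem2_name : String) : Decidable (Pre_get_elem1_elem2_ids xyzs elem1_name elem2_name) := by unfold Pre_get_elem1_elem2_ids; infer_instance
def pvWitness_get_elem1_elem2_ids : List (List String) × String × String := ([["H", "0.0"], ["O", "1.0"], ["h", "2.0"]], "H", "O")

def Spec_get_elem1_elem2_ids (xyzs : List (List String)) (elem1_name : String) (elem2_name : String) (out : List Int × List Int) : Prop := out = get_elem1_elem2_ids_alt xyzs elem1_name elem2_name
instance (xyzs : List (List String)) (elem1_name : String) (elem2_name : String) (out : List Int × List Int) : Decidable (Spec_get_elem1_elem2_ids xyzs elem1_name elem2_name out) := by unfold Spec_get_elem1_elem2_ids; infer_instance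

-- ===== CLAIM (what is proved, stated in full; the proofs are below) =====
def Claim_equal_get_elem1_elem2_ids : Prop := ∀ (xyzs : List (List String)) (elem1_name : String) (elem2_name : String), Dom_get_elem1_elem2_ids xyzs elem1_name elem2_name → Pre_get_elem1_elem2_ids xyzs elem1_name elem2_name → Spec_get_elem1_elem2_ids xyzs elem1_name elem2_name (get_elem1_elem2_ids xyzs elem1_name elem2_name)

-- ===== LEMMAS AND PROOFS =====

-- proof-only helper: the lower-cased leading symbol of a row, as seen by both ports
def pvKey (p : Int × List String) : String := PySem.Str.lower (PySem.List.pyGetD p.2 0 "")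

-- A's loop, on any accumulator pair, appends the matching indices for each name.
theorem a_loop (e1 e2 : String) (l : List (Int × List String)) (a1 a2 : List Int) :
    l.foldl
      (fun st p =>
        let st1 := if PySem.Str.lower (PySem.List.pyGetD p.2 0 "") == PySem.Str.lower e1
                   then (st.1 ++ [p.1], st.2) else st
        if PySem.Str.lower (PySem.List.pyGetD p.2 0 "") == PySem.Str.lower e2
        then (st1.1, st1.2 ++ [p.1]) else st1)
      (a1, a2)
    = (a1 ++ (l.filter (fun p => pvKey p == PySem.Str.lower e1)).map (·.1),
       a2 ++ (l.filter (fun p => pvKey p == PySem.Str.lower e2)).map (·.1)) := by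
  induction l generalizing a1 a2 with
  | nil => simp
  | cons p l ih =>
      simp only [List.foldl_cons, List.filter_cons, pvKey]
      split_ifs with h1 h2 h2 <;> rw [ih] <;> simp [pvKey, h1, h2]

-- B's grouping dict looked up at any key yields the matching indices.
theorem b_lookup (xyzs : List (List String)) (c : String) :
    (pvGroups xyzs).getD c []
    = ((PySem.List.enumerate xyzs 0).filter (fun p => pvKey p == c)).map (·.1) := by
  have hmap : pvGroups xyzs
    = ((PySem.List.enumerate xyzs 0).map (fun p => (pvKey p, p.1))).foldl
        (fun d q => d.modify q.1 [] (· ++ [q.2])) PySem.Dict.empty := by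
    simp [pvGroups, List.foldl_map, pvKey]
  rw [hmap, PySem.Dict.getD_foldl_modify_append, List.filter_map, List.map_map]
  simp [PySem.Dict.getD_empty, Function.comp_def, pvKey]

-- ===== VERDICT (by name: the statement is the Claim_ definition above) =====
theorem get_elem1_elem2_ids_spec : Claim_equal_get_elem1_elem2_ids := by
  intro xyzs e1 e2 _ _
  unfold Spec_get_elem1_elem2_ids get_elem1_elem2_ids get_elem1_elem2_ids_alt
  rw [a_loop, b_lookup, b_lookup]
  simp
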